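-- pv_equiv track=rewrite | github.com/Juahjoah/Algorithm | 프로그래머스/2/388352. 비밀 코드 해독/비밀 코드 해독.py | solution
-- ===== SOURCE A (Python) =====
-- from itertools import combinations
--
-- def solution(n, q, ans):
--     answer = 0
--
--
--     for check in combinations(range(1, n + 1), 5):
--         check_flag = True
--
--
--         for i in range(len(q)):
--             '''
--             cnt = 0
--             for num in check:
--                 if num in q[i]:
--                     cnt += 1
--             '''
--             cnt = len(set(check) & set(q[i]))
--             if cnt != ans[i]:
--                 check_flag = False
--                 break
--
--         if check_flag:
--             answer += 1
--
--     return answer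
-- ===== SOURCE B (Python) =====
-- def solution(n, q, ans):
--     qsets = [set(qi) for qi in q]
--
--     def dfs(start, cnt, rem):
--         if rem == 0:
--             return 1 if all(c == a for c, a in zip(cnt, ans)) else 0
--         total = 0
--         for v in range(start, n + 1):
--             cnt2 = [c + (1 if v in s else 0) for c, s in zip(cnt, qsets)]
--             if any(c > a or c + (rem - 1) < a for c, a in zip(cnt2, ans)):
--                 continue
--             total += dfs(v + 1, cnt2, rem - 1)
--         return total
--
--     return dfs(1, [0] * len(q), 5)
-- ===== Notes on version B (the rewrite author's own statement) =====
-- stated objective: faster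
-- what changed: Replaces the generate-all-C(n,5)-combinations-then-check loop (which rebuilds set(check)&set(q[i]) for every candidate) by a recursive DFS that picks the 5 values in increasing order while incrementally maintaining one match counter per query, pruning any branch whose counters already exceed ans[i] or can no longer reach ans[i].
-- outside the precondition, e.g. on solution(5, [[1], [1]], [0]): A returns 0, B returns 0
import Mathlib
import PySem

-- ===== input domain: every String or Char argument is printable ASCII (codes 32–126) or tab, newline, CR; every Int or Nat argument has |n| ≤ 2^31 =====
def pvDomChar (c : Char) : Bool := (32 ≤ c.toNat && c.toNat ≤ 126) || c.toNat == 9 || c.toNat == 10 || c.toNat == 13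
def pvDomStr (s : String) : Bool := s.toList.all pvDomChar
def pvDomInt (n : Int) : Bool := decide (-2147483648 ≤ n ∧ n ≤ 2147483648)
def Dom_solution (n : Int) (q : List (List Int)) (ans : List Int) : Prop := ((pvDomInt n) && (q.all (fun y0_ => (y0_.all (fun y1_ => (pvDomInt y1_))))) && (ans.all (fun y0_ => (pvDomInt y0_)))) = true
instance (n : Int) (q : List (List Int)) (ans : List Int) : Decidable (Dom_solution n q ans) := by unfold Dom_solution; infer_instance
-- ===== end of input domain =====

-- B replaces A's generate-all-combinations-and-re-check scan by a pruned DFS with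
-- incrementally maintained per-query match counters (objective: faster on constrained queries).

-- ===== PORT A =====
-- itertools.combinations(xs, k), ported by hand (lexicographic order, exact)
def combosA : List Int → Nat → List (List Int)
  | _, 0 => [[]]
  | [], _ + 1 => []
  | x :: rest, k + 1 => (combosA rest k).map (fun c => x :: c) ++ combosA rest (k + 1)

-- cnt = len(set(check) & set(q[i]))
def interLen (check qi : List Int) : Int :=
  ((PySem.Set.inter (PySem.Set.ofList check) (PySem.Set.ofList qi)).length : Int)

-- the inner 'for i in range(len(q))' loop with its break; ans[i] is read with
-- pyGet? and a .getD 0 total-form (the index is in range on every input Pre_ admits)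
def checkLoop (check : List Int) (ans : List Int) : List (List Int) → Nat → Bool
  | [], _ => true
  | qi :: rest, i =>
    if interLen check qi ≠ (PySem.List.pyGet? ans (i : Int)).getD 0 then false
    else checkLoop check ans rest (i + 1)

def solution (n : Int) (q : List (List Int)) (ans : List Int) : Int :=
  (combosA (PySem.List.pyRange 1 (n + 1) 1) 5).foldl
    (fun answer check => if checkLoop check ans q 0 then answer + 1 else answer) 0

-- ===== PORT B =====
-- cnt2 = [c + (1 if v in s else 0) for c, s in zip(cnt, qsets)]
def stepCnt (qsets : List (PySem.Set Int)) (cnt : List Int) (v : Int) : List Int :=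
  List.zipWith (fun c s => c + if PySem.Set.contains s v then 1 else 0) cnt qsets

-- all(c == a for c, a in zip(cnt, ans))
def leafOk (ans cnt : List Int) : Bool := (cnt.zip ans).all (fun p => p.1 == p.2)

-- any(c > a or c + (rem - 1) < a for c, a in zip(cnt2, ans))  (rem1 = rem - 1)
def pruneB (ans cnt2 : List Int) (rem1 : Nat) : Bool :=
  (cnt2.zip ans).any (fun p => decide (p.2 < p.1) || decide (p.1 + (rem1 : Int) < p.2))

def dfsB (n : Int) (qsets : List (PySem.Set Int)) (ans : List Int) : Nat → Int → List Int → Int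
  | 0, _, cnt => if leafOk ans cnt then 1 else 0
  | rem + 1, start, cnt =>
    (PySem.List.pyRange start (n + 1) 1).foldl
      (fun total v =>
        let cnt2 := stepCnt qsets cnt v
        if pruneB ans cnt2 rem then total
        else total + dfsB n qsets ans rem (v + 1) cnt2) 0

def solution_alt (n : Int) (q : List (List Int)) (ans : List Int) : Int :=
  dfsB n (q.map PySem.Set.ofList) ans 5 1 (List.replicate q.length 0)

-- ===== PRECONDITION & SPEC =====
-- Pre_ excludes inputs with more queries than answers while n ≥ 5: there A reads ans[i]
-- past the end and may raise IndexError (whether it does depends on the data, so the whole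
-- region is excluded; on part of it A still returns, see the cite in claim.json).
def Pre_solution (n : Int) (q : List (List Int)) (ans : List Int) : Prop :=
  q.length ≤ ans.length ∨ n < 5
instance (n : Int) (q : List (List Int)) (ans : List Int) : Decidable (Pre_solution n q ans) := by unfold Pre_solution; infer_instance

def pvWitness_solution : Int × List (List Int) × List Int := (5, [[1, 2]], [2])

def Spec_solution (n : Int) (q : List (List Int)) (ans : List Int) (out : Int) : Prop := out = solution_alt n q ans
instance (n : Int) (q : List (List Int)) (ans : List Int) (out : Int) : Decidable (Spec_solution n q ans out) := by unfold Spec_solution; infer_instance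

-- ===== CLAIM (what is proved, stated in full; the proofs are below) =====
def Claim_equal_solution : Prop := ∀ (n : Int) (q : List (List Int)) (ans : List Int), Dom_solution n q ans → Pre_solution n q ans → Spec_solution n q ans (solution n q ans)

-- ===== LEMMAS AND PROOFS =====

-- number of chosen values lying in a query set
def countIn (s : PySem.Set Int) (c : List Int) : Int :=
  ((c.filter (fun v => PySem.Set.contains s v)).length : Int)

-- the counters after processing all of c
def finalCnt (qsets : List (PySem.Set Int)) (cnt : List Int) (c : List Int) : List Int :=
  List.zipWith (fun a s => a + countIn s c) cnt qsets

theorem countIn_nil (s : PySem.Set Int) : countIn s [] = 0 := rfl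

theorem countIn_cons (s : PySem.Set Int) (v : Int) (c : List Int) :
    countIn s (v :: c) = (if PySem.Set.contains s v then 1 else 0) + countIn s c := by
  simp [countIn, List.filter_cons]
  split
  · simp
    omega
  · simp

theorem countIn_nonneg (s : PySem.Set Int) (c : List Int) : 0 ≤ countIn s c := by
  simp [countIn]

theorem countIn_le_length (s : PySem.Set Int) (c : List Int) :
    countIn s c ≤ (c.length : Int) := by
  simp [countIn]
  exact_mod_cast List.length_filter_le _ _

theorem finalCnt_nil (qsets : List (PySem.Set Int)) (cnt : List Int)
    (h : cnt.length ≤ qsets.length) : finalCnt qsets cnt [] = cnt := by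
  induction cnt generalizing qsets with
  | nil => simp [finalCnt]
  | cons a t ih =>
    cases qsets with
    | nil => simp at h
    | cons s rest =>
      simp [finalCnt, countIn_nil] at *
      exact ih rest h

theorem finalCnt_step (qsets : List (PySem.Set Int)) (cnt : List Int) (v : Int) (c : List Int) :
    finalCnt qsets (stepCnt qsets cnt v) c = finalCnt qsets cnt (v :: c) := by
  induction cnt generalizing qsets with
  | nil => simp [finalCnt, stepCnt]
  | cons a t ih =>
    cases qsets with
    | nil => simp [finalCnt, stepCnt]
    | cons s rest =>
      simp [finalCnt, stepCnt, countIn_cons] at *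
      constructor
      · omega
      · exact ih rest

theorem length_stepCnt (qsets : List (PySem.Set Int)) (cnt : List Int) (v : Int) :
    (stepCnt qsets cnt v).length = min cnt.length qsets.length := by
  simp [stepCnt]

theorem length_finalCnt (qsets : List (PySem.Set Int)) (cnt c : List Int) :
    (finalCnt qsets cnt c).length = min cnt.length qsets.length := by
  simp [finalCnt]

theorem getElem_finalCnt (qsets : List (PySem.Set Int)) (cnt c : List Int) (j : Nat)
    (h : j < (finalCnt qsets cnt c).length) :
    (finalCnt qsets cnt c)[j] =
      cnt[j]'(by simp [length_finalCnt] at h; omega) + countIn (qsets[j]'(by simp [length_finalCnt] at h; omega)) c := by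
  simp [finalCnt]

-- members of combosA xs k have length k and are sublists of xs
theorem combosA_zero (xs : List Int) : combosA xs 0 = [[]] := by
  cases xs <;> rfl

theorem mem_combosA {xs : List Int} {k : Nat} {c : List Int} (h : c ∈ combosA xs k) :
    c.length = k ∧ c.Sublist xs := by
  induction xs generalizing k c with
  | nil =>
    cases k with
    | zero => simp [combosA] at h; simp [h]
    | succ k => simp [combosA] at h
  | cons x rest ih =>
    cases k with
    | zero => simp [combosA] at h; simp [h]
    | succ k =>
      simp [combosA] at h
      rcases h with ⟨c', hc', rfl⟩ | h
      · obtain ⟨hl, hs⟩ := ih hc'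
        exact ⟨by simp [hl], List.Sublist.cons₂ x hs⟩
      · obtain ⟨hl, hs⟩ := ih h
        exact ⟨hl, hs.cons x⟩

theorem combosA_nil_of_short {xs : List Int} {k : Nat} (h : xs.length < k) :
    combosA xs k = [] := by
  induction xs generalizing k with
  | nil => cases k with
    | zero => omega
    | succ k => rfl
  | cons x rest ih =>
    cases k with
    | zero => omega
    | succ k =>
      simp at h
      rw [combosA]
      simp [ih (k := k) (by omega), ih (k := k + 1) (by omega)]

-- pruning is sound: a pruned branch contains no accepted completion
theorem prune_sound (qsets : List (PySem.Set Int)) (ans cnt2 c : List Int) (rem : Nat)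
    (hlen : cnt2.length ≤ qsets.length) (hc : c.length = rem)
    (hp : pruneB ans cnt2 rem = true) :
    leafOk ans (finalCnt qsets cnt2 c) = false := by
  rw [pruneB, List.any_eq_true] at hp
  obtain ⟨x, hx, hbad⟩ := hp
  obtain ⟨j, hj, rfl⟩ := List.mem_iff_getElem.1 hx
  simp only [List.length_zip] at hj
  rw [List.getElem_zip] at hbad
  simp only [Bool.or_eq_true, decide_eq_true_eq] at hbad
  cases hF : leafOk ans (finalCnt qsets cnt2 c) with
  | false => rfl
  | true =>
    exfalso
    rw [leafOk, List.all_eq_true] at hF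
    have hjf : j < ((finalCnt qsets cnt2 c).zip ans).length := by
      simp only [List.length_zip, length_finalCnt]; omega
    have h2 := hF _ (List.getElem_mem hjf)
    rw [List.getElem_zip] at h2
    simp only [beq_iff_eq] at h2
    rw [getElem_finalCnt] at h2
    have hjq : j < qsets.length := by omega
    have b1 := countIn_nonneg (qsets[j]'hjq) c
    have b2 := countIn_le_length (qsets[j]'hjq) c
    rw [hc] at b2
    omega

-- the heart: dfsB counts accepted completions among combinations of the remaining range
-- the loop body in additive form
theorem dfsB_body (n : Int) (qsets : List (PySem.Set Int)) (ans : List Int) (rem : Nat)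
    (cnt : List Int) :
    (fun (total : Int) v =>
        let cnt2 := stepCnt qsets cnt v
        if pruneB ans cnt2 rem then total
        else total + dfsB n qsets ans rem (v + 1) cnt2) =
      (fun (total : Int) v => total +
        (if pruneB ans (stepCnt qsets cnt v) rem then 0
         else dfsB n qsets ans rem (v + 1) (stepCnt qsets cnt v))) := by
  funext t v
  simp only []
  split <;> simp

theorem dfs_eq_aux (n : Int) (qsets : List (PySem.Set Int)) (ans : List Int) :
    ∀ (rem k : Nat) (start : Int), (n + 1 - start).toNat ≤ k →
      ∀ (cnt : List Int), cnt.length ≤ qsets.length →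
      dfsB n qsets ans rem start cnt =
        (((combosA (PySem.List.pyRange start (n + 1) 1) rem)).filter
          (fun c => leafOk ans (finalCnt qsets cnt c))).length := by
  intro rem
  induction rem with
  | zero =>
    intro k start hk cnt hcnt
    rw [dfsB]
    simp only [combosA_zero, List.filter_cons, List.filter_nil]
    rw [finalCnt_nil qsets cnt hcnt]
    split <;> simp
  | succ rem ihrem =>
    intro k
    induction k with
    | zero =>
      intro start hk cnt hcnt
      have hns : (n + 1 : Int) ≤ start := by omega
      rw [dfsB, PySem.List.pyRange_one_eq_nil hns]
      rfl
    | succ k ihk =>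
      intro start hk cnt hcnt
      by_cases hs : start < n + 1
      · have hT := PySem.List.pyRange_one_cons hs
        rw [dfsB, dfsB_body, PySem.List.foldl_add, hT]
        rw [List.map_cons, List.sum_cons]
        have hrest : (List.map
            (fun v => if pruneB ans (stepCnt qsets cnt v) rem then 0
                      else dfsB n qsets ans rem (v + 1) (stepCnt qsets cnt v))
            (PySem.List.pyRange (start + 1) (n + 1) 1)).sum =
            dfsB n qsets ans (rem + 1) (start + 1) cnt := by
          rw [dfsB, dfsB_body, PySem.List.foldl_add]
          simp
        rw [hrest, ihk (start + 1) (by omega) cnt hcnt]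
        -- right-hand side: split the combinations at the first value
        rw [combosA, List.filter_append, List.length_append, List.filter_map,
          List.length_map]
        have hpred : ((fun c => leafOk ans (finalCnt qsets cnt c)) ∘ (fun c => start :: c)) =
            fun c => leafOk ans (finalCnt qsets (stepCnt qsets cnt start) c) := by
          funext c
          simp only [Function.comp]
          rw [finalCnt_step]
        rw [hpred]
        have hlen2 : (stepCnt qsets cnt start).length ≤ qsets.length := by
          rw [length_stepCnt]; omega
        cases hp : pruneB ans (stepCnt qsets cnt start) rem with
        | true =>
          have hnil : (combosA (PySem.List.pyRange (start + 1) (n + 1) 1) rem).filter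
              (fun c => leafOk ans (finalCnt qsets (stepCnt qsets cnt start) c)) = [] := by
            rw [List.filter_eq_nil_iff]
            intro c hcm
            rw [prune_sound qsets ans _ c rem hlen2 (mem_combosA hcm).1 hp]
            simp
          rw [hnil]
          simp
        | false =>
          rw [ihrem k (start + 1) (by omega) _ hlen2]
          push_cast
          omega
      · have hns : (n + 1 : Int) ≤ start := by omega
        rw [dfsB, PySem.List.pyRange_one_eq_nil hns]
        rfl

theorem dfs_eq (n : Int) (qsets : List (PySem.Set Int)) (ans : List Int)
    (rem : Nat) (start : Int) (cnt : List Int) (hcnt : cnt.length ≤ qsets.length) :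
    dfsB n qsets ans rem start cnt =
      (((combosA (PySem.List.pyRange start (n + 1) 1) rem)).filter
        (fun c => leafOk ans (finalCnt qsets cnt c))).length :=
  dfs_eq_aux n qsets ans rem ((n + 1 - start).toNat) start le_rfl cnt hcnt

-- A's outer loop is a filtered count
theorem solutionA_count (n : Int) (q : List (List Int)) (ans : List Int) :
    solution n q ans =
      ((combosA (PySem.List.pyRange 1 (n + 1) 1) 5).filter
        (fun c => checkLoop c ans q 0)).length := by
  simp [solution, PySem.List.foldl_count_if, List.countP_eq_length_filter]

-- the inner loop agrees with the zip-all formulation when ans is long enough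
theorem checkLoop_eq (c : List Int) (ans : List Int) :
    ∀ (qrest : List (List Int)) (i : Nat), i + qrest.length ≤ ans.length →
      checkLoop c ans qrest i =
        ((qrest.map (fun qi => interLen c qi)).zip (ans.drop i)).all (fun p => p.1 == p.2) := by
  intro qrest
  induction qrest with
  | nil => intro i h; simp [checkLoop]
  | cons qi rest ih =>
    intro i h
    simp only [List.length_cons] at h
    have hi : i < ans.length := by omega
    rw [checkLoop, PySem.List.pyGet?_ofNat ans i hi, List.drop_eq_getElem_cons hi]
    simp only [List.map_cons, List.zip_cons_cons, List.all_cons, Option.getD_some]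
    by_cases heq : interLen c qi = ans[i]
    · simp [heq, ih (i + 1) (by omega)]
    · simp [heq]

-- per-query: A's set-intersection count equals B's membership count, for duplicate-free c
theorem interLen_eq_countIn (c qi : List Int) (hc : c.Nodup) :
    interLen c qi = countIn (PySem.Set.ofList qi) c := by
  rw [interLen, PySem.Set.ofList_eq_self_of_nodup c hc]
  simp [countIn, PySem.Set.inter]

theorem finalCnt_zero (q : List (List Int)) (c : List Int) :
    finalCnt (q.map PySem.Set.ofList) (List.replicate q.length 0) c =
      q.map (fun qi => countIn (PySem.Set.ofList qi) c) := by
  induction q with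
  | nil => rfl
  | cons qi rest ih => simp [finalCnt, List.replicate_succ] at *; exact ih

-- ===== VERDICT (by name: the statement is the Claim_ definition above) =====
theorem solution_spec : Claim_equal_solution := by
  intro n q ans _hdom hpre
  show solution n q ans = solution_alt n q ans
  rw [solutionA_count, solution_alt,
    dfs_eq n (q.map PySem.Set.ofList) ans 5 1 (List.replicate q.length 0) (by simp)]
  rcases hpre with hq | hn
  · have hfil : ∀ c ∈ combosA (PySem.List.pyRange 1 (n + 1) 1) 5,
        checkLoop c ans q 0 =
          leafOk ans (finalCnt (q.map PySem.Set.ofList) (List.replicate q.length 0) c) := by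
      intro c hcm
      have hnd : c.Nodup :=
        ((mem_combosA hcm).2.nodup (PySem.List.nodup_pyRange_one 1 (n + 1)))
      rw [finalCnt_zero, checkLoop_eq c ans q 0 (by omega), List.drop_zero, leafOk]
      congr 2
      apply List.map_congr_left
      intro qi _
      exact interLen_eq_countIn c qi hnd
    rw [List.filter_congr hfil]
  · have hshort : (PySem.List.pyRange 1 (n + 1) 1).length < 5 := by
      rw [PySem.List.length_pyRange_one]
      omega
    rw [combosA_nil_of_short hshort]
    rfl
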